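-- pv_equiv track=rewrite | github.com/100sidedice/PaintFactory | src/UI/ui_editor.py | _element_json_path_is_instant_safe
-- ===== SOURCE A (Python) =====
-- def _element_json_path_is_instant_safe(path):
--     normalized = str(path).lower()
--     while "[" in normalized and "]" in normalized:
--         lidx = normalized.find("[")
--         ridx = normalized.find("]", lidx)
--         if ridx == -1:
--             break
--         normalized = normalized[:lidx] + normalized[ridx + 1 :]
--
--     segments = [seg for seg in normalized.split(".") if seg]
--     if not segments:
--         return False
--
--     if normalized == "container.pos" or normalized == "container.size":
--         return True
--
--     for seg in segments:
--         if "color" in seg or "colour" in seg or "tint" in seg: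
--             return True
--     return False
-- ===== SOURCE B (Python) =====
-- def _element_json_path_is_instant_safe(path):
--     # Single left-to-right pass: buffer chars after an unclosed '[', drop the
--     # buffer when its ']' arrives, flush it if it never closes.
--     out = []
--     pending = None
--     for ch in str(path).lower():
--         if pending is None:
--             if ch == "[":
--                 pending = ["["]
--             else:
--                 out.append(ch)
--         elif ch == "]":
--             pending = None
--         else:
--             pending.append(ch)
--     if pending is not None:
--         out.extend(pending)
--     s = "".join(out)
--     if s in ("container.pos", "container.size"):
--         return True
--     return any("color" in seg or "colour" in seg or "tint" in seg
--                for seg in s.split("."))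
-- ===== Notes on version B (the rewrite author's own statement) =====
-- stated objective: alternative
-- what changed: The while-loop that repeatedly re-scans the string with find() and rebuilds it by slicing out one bracket group per iteration is replaced by a single left-to-right pass that buffers characters after an unclosed opening bracket and drops the buffer when the matching closing bracket arrives; the empty-segment filter and the early empty-segments return are dropped because empty segments can never contain a keyword, and the keyword test runs directly over the split.
import Mathlib
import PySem

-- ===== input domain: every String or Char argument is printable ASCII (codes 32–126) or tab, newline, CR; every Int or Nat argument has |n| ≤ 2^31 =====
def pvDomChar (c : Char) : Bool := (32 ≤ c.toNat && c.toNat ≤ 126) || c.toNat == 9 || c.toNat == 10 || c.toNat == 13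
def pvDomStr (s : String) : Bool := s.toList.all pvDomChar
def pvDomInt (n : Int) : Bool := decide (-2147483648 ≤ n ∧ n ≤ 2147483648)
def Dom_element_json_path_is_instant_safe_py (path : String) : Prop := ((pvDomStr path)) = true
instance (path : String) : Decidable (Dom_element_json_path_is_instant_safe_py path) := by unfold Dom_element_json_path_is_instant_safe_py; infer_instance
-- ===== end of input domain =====

-- B replaces A's find/slice while-loop over bracket groups by one single pass with a
-- pending buffer and drops the redundant empty-segment filtering; return values are identical.

-- ===== PORT A =====
-- support lemmas cited by the port's termination proof (characterise find/findFrom on one-char needles)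
theorem pvSingPrefix (c : Char) (l : List Char) : [c] <+: l ↔ l.head? = some c := by
  cases l with
  | nil => simp
  | cons a t =>
    constructor
    · rintro ⟨u, hu⟩; simp at hu; simp [hu.1]
    · intro h; simp at h; exact ⟨t, by simp [h]⟩

theorem pvSingInfix (c : Char) (l : List Char) : [c] <:+: l ↔ c ∈ l :=
  List.singleton_infix_iff c l

theorem pvDropWhile_drop {α : Type} (p : α → Bool) (s : List α) :
    s.dropWhile p = s.drop (s.takeWhile p).length := by
  induction s with
  | nil => simp
  | cons a t ih =>
    by_cases h : p a
    · rw [List.dropWhile_cons_of_pos h, List.takeWhile_cons_of_pos h]; simpa using ih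
    · rw [List.dropWhile_cons_of_neg h, List.takeWhile_cons_of_neg h]; simp

theorem pvTakeWhile_take {α : Type} (p : α → Bool) (s : List α) (j : Nat)
    (hjlt : j < s.length) (hj : p (s[j]) = false)
    (hmin : ∀ i (h : i < j), p (s[i]) = true) : s.takeWhile p = s.take j := by
  induction s generalizing j with
  | nil => simp at hjlt
  | cons a t ih =>
    cases j with
    | zero => simp at hj; rw [List.takeWhile_cons_of_neg (by simp [hj]), List.take_zero]
    | succ j =>
      have ha : p a = true := by have := hmin 0 (by omega); simpa using this
      rw [List.takeWhile_cons_of_pos ha, List.take_succ_cons]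
      exact congrArg (a :: ·) (ih j (by simpa using hjlt) (by simpa using hj)
        (fun i hi => by have := hmin (i+1) (by omega); simpa using this))

theorem pvFind_eq (c : Char) (s : List Char) (h : c ∈ s) :
    PySem.Chars.find s [c] = ((s.takeWhile (· ≠ c)).length : Int) := by
  have h0 : 0 ≤ PySem.Chars.find s [c] :=
    (PySem.Chars.find_nonneg_iff s [c]).2 ((pvSingInfix c s).2 h)
  obtain ⟨h1, h2⟩ := PySem.Chars.find_spec h0
  set j := (PySem.Chars.find s [c]).toNat with hjdef
  have hjlt : j < s.length := by
    rcases h1 with ⟨u, hu⟩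
    have := congrArg List.length hu
    simp [List.length_drop] at this
    omega
  have hjc : s[j] = c := by
    have := (pvSingPrefix c _).1 h1
    rw [List.head?_drop] at this
    simpa [List.getElem?_eq_getElem hjlt] using this
  have hmin : ∀ i (hi : i < j), s[i] ≠ c := by
    intro i hi hc
    exact h2 i hi ((pvSingPrefix c _).2 (by
      rw [List.head?_drop]
      simp [List.getElem?_eq_getElem (by omega : i < s.length), hc]))
  have htw : s.takeWhile (· ≠ c) = s.take j :=
    pvTakeWhile_take _ s j hjlt (by simp [hjc]) (fun i hi => by simp [hmin i hi])
  rw [htw, List.length_take, Nat.min_eq_left (by omega)]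
  omega

theorem pvLenSplit {α : Type} (p : α → Bool) (s : List α) :
    (s.takeWhile p).length + (s.dropWhile p).length = s.length := by
  rw [← List.length_append, List.takeWhile_append_dropWhile]

-- the clean one-step form of A's loop body, and the loop guard, used throughout the proofs
def pvStepList (s : List Char) : List Char :=
  s.takeWhile (· ≠ '[') ++ ((s.dropWhile (· ≠ '[')).dropWhile (· ≠ ']')).tail

abbrev pvCond (s : List Char) : Prop := ']' ∈ s.dropWhile (· ≠ '[')

theorem pvStep_lt (s : List Char) (h : pvCond s) : (pvStepList s).length < s.length := by
  have h' : ']' ∈ s.dropWhile (· ≠ '[') := h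
  have hq : (s.dropWhile (· ≠ '[')).dropWhile (· ≠ ']') ≠ [] := by
    intro hnil
    have := (List.dropWhile_eq_nil_iff).1 hnil ']' h'
    simp at this
  have h1 : ((s.dropWhile (· ≠ '[')).dropWhile (· ≠ ']')).length ≤ (s.dropWhile (· ≠ '[')).length :=
    List.length_dropWhile_le _ _
  have h2 : ((s.dropWhile (· ≠ '[')).dropWhile (· ≠ ']')).length ≠ 0 :=
    fun h0 => hq (List.eq_nil_iff_length_eq_zero.mpr h0)
  have hrne : (s.dropWhile (· ≠ '[')).length ≠ 0 := by
    intro h0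
    rw [List.eq_nil_iff_length_eq_zero.mpr h0] at h'
    simp at h'
  have hlen := pvLenSplit (· ≠ '[') s
  rw [pvStepList, List.length_append, List.length_tail]
  omega

-- A's loop argument after one iteration IS pvStepList (needed to discharge termination)
theorem pvSliceStep (s : List Char)
    (hb : (PySem.Chars.isIn ['['] s && PySem.Chars.isIn [']'] s) = true)
    (hr : PySem.Chars.findFrom s [']'] (PySem.Chars.find s ['[']) none ≠ -1) :
    pvCond s ∧
    PySem.List.slice s none (some (PySem.Chars.find s ['['])) ++
      PySem.List.slice s (some (PySem.Chars.findFrom s [']'] (PySem.Chars.find s ['[']) none + 1)) none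
      = pvStepList s := by
  simp only [Bool.and_eq_true, PySem.Chars.isIn_iff_infix, pvSingInfix] at hb
  obtain ⟨hlb, _⟩ := hb
  have hfind : PySem.Chars.find s ['['] = ((s.takeWhile (· ≠ '[')).length : Int) :=
    pvFind_eq '[' s hlb
  set a := (s.takeWhile (· ≠ '[')).length with hadef
  have ha : a ≤ s.length := (List.takeWhile_prefix _).length_le
  have hdropa : s.drop a = s.dropWhile (· ≠ '[') := (pvDropWhile_drop _ s).symm
  rw [hfind, PySem.Chars.findFrom_natCast s [']'] a ha] at hr ⊢
  by_cases hf2 : PySem.Chars.find (s.drop a) [']'] = -1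
  · simp [hf2] at hr
  · have hmem : ']' ∈ s.drop a := by
      have := PySem.Chars.find_eq_neg_one_iff (s.drop a) [']']
      rw [pvSingInfix] at this
      by_contra hn; exact hf2 (this.2 hn)
    have hcond : pvCond s := by rwa [hdropa] at hmem
    refine ⟨hcond, ?_⟩
    have hfind2 : PySem.Chars.find (s.drop a) [']'] = (((s.drop a).takeWhile (· ≠ ']')).length : Int) :=
      pvFind_eq ']' (s.drop a) hmem
    rw [if_neg hf2, hfind2]
    have hcast : (a : Int) + (((s.drop a).takeWhile (· ≠ ']')).length : Int) + 1
        = ((a + ((s.drop a).takeWhile (· ≠ ']')).length + 1 : Nat) : Int) := by push_cast; ring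
    rw [hcast, PySem.List.slice_to_natCast, PySem.List.slice_from_natCast]
    have htake : s.take a = s.takeWhile (· ≠ '[') :=
      (List.prefix_iff_eq_take.mp (List.takeWhile_prefix _)).symm
    have hdropall : s.drop (a + ((s.drop a).takeWhile (· ≠ ']')).length + 1)
        = ((s.dropWhile (· ≠ '[')).dropWhile (· ≠ ']')).tail := by
      rw [← List.tail_drop, ← List.drop_drop, ← pvDropWhile_drop, hdropa]
    rw [htake, hdropall]; rfl

theorem pvLoopA_dec (s : List Char)
    (hb : (PySem.Chars.isIn ['['] s && PySem.Chars.isIn [']'] s) = true)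
    (hr : PySem.Chars.findFrom s [']'] (PySem.Chars.find s ['[']) none ≠ -1) :
    (PySem.List.slice s none (some (PySem.Chars.find s ['['])) ++
      PySem.List.slice s (some (PySem.Chars.findFrom s [']'] (PySem.Chars.find s ['[']) none + 1)) none).length
      < s.length := by
  obtain ⟨hc, heq⟩ := pvSliceStep s hb hr
  rw [heq]
  exact pvStep_lt s hc

-- the while loop of A, step for step: find '[', find ']' from there, splice the two slices
def pvLoopA (s : List Char) : List Char :=
  if hb : PySem.Chars.isIn ['['] s && PySem.Chars.isIn [']'] s then
    let lidx := PySem.Chars.find s ['[']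
    let ridx := PySem.Chars.findFrom s [']'] lidx none
    if hr : ridx = -1 then s
    else pvLoopA (PySem.List.slice s none (some lidx) ++ PySem.List.slice s (some (ridx + 1)) none)
  else s
termination_by s.length
decreasing_by exact pvLoopA_dec s hb hr

def pvKeywordSeg (seg : List Char) : Bool :=
  PySem.Chars.isIn "color".toList seg || PySem.Chars.isIn "colour".toList seg ||
    PySem.Chars.isIn "tint".toList seg

def element_json_path_is_instant_safe_py (path : String) : Bool :=
  let normalized := pvLoopA (PySem.Str.lower path).toList
  let segments := (PySem.Chars.splitOn normalized ['.']).filter (fun seg => !seg.isEmpty)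
  if segments = [] then false
  else if normalized = "container.pos".toList ∨ normalized = "container.size".toList then true
  else segments.any pvKeywordSeg

-- ===== PORT B =====
-- one pass over the characters: out = emitted chars, pending = buffer after an unclosed '['
def pvStepB (st : List Char × Option (List Char)) (ch : Char) : List Char × Option (List Char) :=
  match st.2 with
  | none => if ch = '[' then (st.1, some ['[']) else (st.1 ++ [ch], none)
  | some buf => if ch = ']' then (st.1, none) else (st.1, some (buf ++ [ch]))

def element_json_path_is_instant_safe_py_alt (path : String) : Bool :=
  let st := (PySem.Str.lower path).toList.foldl pvStepB ([], none)
  let s := st.1 ++ st.2.getD []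
  if s = "container.pos".toList ∨ s = "container.size".toList then true
  else (PySem.Chars.splitOn s ['.']).any pvKeywordSeg

-- ===== PRECONDITION & SPEC =====
def Spec_element_json_path_is_instant_safe_py (path : String) (out : Bool) : Prop := out = element_json_path_is_instant_safe_py_alt path
instance (path : String) (out : Bool) : Decidable (Spec_element_json_path_is_instant_safe_py path out) := by unfold Spec_element_json_path_is_instant_safe_py; infer_instance

-- ===== CLAIM (what is proved, stated in full; the proofs are below) =====
def Claim_equal_element_json_path_is_instant_safe_py : Prop := ∀ (path : String), Dom_element_json_path_is_instant_safe_py path → Spec_element_json_path_is_instant_safe_py path (element_json_path_is_instant_safe_py path)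

-- ===== LEMMAS AND PROOFS =====

theorem pvCond_mem (s : List Char) (h : pvCond s) : '[' ∈ s ∧ ']' ∈ s := by
  have h' : ']' ∈ s.dropWhile (· ≠ '[') := h
  constructor
  · by_contra hlb
    have hnil : s.dropWhile (· ≠ '[') = [] :=
      List.dropWhile_eq_nil_iff.2 (fun x hx => by simp; rintro rfl; exact hlb hx)
    rw [hnil] at h'; simp at h'
  · exact (List.dropWhile_sublist _).mem h' 

-- the clean recursive form of B's scan, used only in the proofs
def pvScanB : List Char → List Char
  | [] => []
  | c :: t =>
    if c = '[' then
      if ']' ∈ t then pvScanB ((t.dropWhile (· ≠ ']')).tail) else c :: t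
    else c :: pvScanB t
termination_by s => s.length
decreasing_by
  · simp only [List.length_cons]
    have h1 : (t.dropWhile (· ≠ ']')).tail.length ≤ (t.dropWhile (· ≠ ']')).length := by
      simp [List.length_tail]
    have h2 : (t.dropWhile (· ≠ ']')).length ≤ t.length := List.length_dropWhile_le _ _
    omega
  · simp only [List.length_cons]
    omega

theorem pvScanB_nil : pvScanB [] = [] := by rw [pvScanB]

theorem pvScanB_lb (t : List Char) (h : ']' ∈ t) :
    pvScanB ('[' :: t) = pvScanB ((t.dropWhile (· ≠ ']')).tail) := by
  rw [pvScanB]; simp [h]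

theorem pvScanB_lb_no (t : List Char) (h : ']' ∉ t) : pvScanB ('[' :: t) = '[' :: t := by
  rw [pvScanB]; simp [h]

theorem pvScanB_cons (c : Char) (t : List Char) (h : c ≠ '[') :
    pvScanB (c :: t) = c :: pvScanB t := by
  rw [pvScanB]; simp [h]

theorem pvScanB_id (s : List Char) (h : ¬ pvCond s) : pvScanB s = s := by
  induction s with
  | nil => exact pvScanB_nil
  | cons c t ih =>
    by_cases hc : c = '['
    · subst hc
      have hnm : ']' ∉ t := by
        intro hm
        exact h (show ']' ∈ _ by
          rw [List.dropWhile_cons_of_neg (by simp)]; exact List.mem_cons_of_mem _ hm)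
      exact pvScanB_lb_no t hnm
    · rw [pvScanB_cons c t hc, ih (fun hm => h (show ']' ∈ _ by
        rw [List.dropWhile_cons_of_pos (by simp [hc])]; exact hm))]

theorem pvScanB_prefix (p x : List Char) (hp : '[' ∉ p) :
    pvScanB (p ++ x) = p ++ pvScanB x := by
  induction p with
  | nil => simp
  | cons a t ih =>
    have ha : a ≠ '[' := fun h => hp (h ▸ List.mem_cons_self)
    rw [List.cons_append, pvScanB_cons a _ ha, ih (fun h => hp (List.mem_cons_of_mem a h)),
      List.cons_append]

theorem pvDropWhileHead {α : Type} (p : α → Bool) (l : List α) (hd : α) (tl : List α)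
    (h : l.dropWhile p = hd :: tl) : p hd = false := by
  induction l with
  | nil => simp at h
  | cons a t ih =>
    by_cases hp : p a
    · rw [List.dropWhile_cons_of_pos hp] at h; exact ih h
    · rw [List.dropWhile_cons_of_neg hp] at h
      cases h; simpa using hp

theorem pvScanB_step (s : List Char) (h : pvCond s) :
    pvScanB s = pvScanB (pvStepList s) := by
  have h' : ']' ∈ s.dropWhile (· ≠ '[') := h
  have hrne : s.dropWhile (· ≠ '[') ≠ [] := fun h0 => by rw [h0] at h'; simp at h'
  obtain ⟨hd, r2, hcons⟩ := List.exists_cons_of_ne_nil hrne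
  have hhd : hd = '[' := by
    have hp := pvDropWhileHead _ s hd r2 hcons
    simpa using hp
  subst hhd
  have hmem2 : ']' ∈ r2 := by rw [hcons] at h'; simpa using h'
  have hnotw : '[' ∉ s.takeWhile (· ≠ '[') := fun hm => by simpa using List.mem_takeWhile_imp hm
  have hsr : s = s.takeWhile (· ≠ '[') ++ '[' :: r2 := by
    conv_lhs => rw [← List.takeWhile_append_dropWhile (p := (· ≠ '[')) (l := s)]
    rw [hcons]
  have hstep : pvStepList s = s.takeWhile (· ≠ '[') ++ (r2.dropWhile (· ≠ ']')).tail := by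
    rw [pvStepList, hcons, List.dropWhile_cons_of_pos (by decide)]
  calc pvScanB s = pvScanB (s.takeWhile (· ≠ '[') ++ '[' :: r2) := by rw [← hsr]
    _ = s.takeWhile (· ≠ '[') ++ pvScanB ('[' :: r2) := pvScanB_prefix _ _ hnotw
    _ = s.takeWhile (· ≠ '[') ++ pvScanB ((r2.dropWhile (· ≠ ']')).tail) := by
        rw [pvScanB_lb r2 hmem2]
    _ = pvScanB (s.takeWhile (· ≠ '[') ++ (r2.dropWhile (· ≠ ']')).tail) :=
        (pvScanB_prefix _ _ hnotw).symm
    _ = pvScanB (pvStepList s) := by rw [hstep]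

-- A's loop, rephrased through pvStepList / pvCond
theorem pvLoopA_eq (s : List Char) :
    pvLoopA s = if pvCond s then pvLoopA (pvStepList s) else s := by
  rw [pvLoopA]
  by_cases hb : (PySem.Chars.isIn ['['] s && PySem.Chars.isIn [']'] s) = true
  · rw [dif_pos hb]
    by_cases hr : PySem.Chars.findFrom s [']'] (PySem.Chars.find s ['[']) none = -1
    · have hnc : ¬ pvCond s := by
        intro hc
        obtain ⟨hlb, _⟩ := pvCond_mem s hc
        have hfind : PySem.Chars.find s ['['] = ((s.takeWhile (· ≠ '[')).length : Int) :=
          pvFind_eq '[' s hlb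
        have ha : (s.takeWhile (· ≠ '[')).length ≤ s.length := (List.takeWhile_prefix _).length_le
        rw [hfind, PySem.Chars.findFrom_natCast_eq_neg_one_iff s [']'] _ ha, pvSingInfix,
          ← pvDropWhile_drop] at hr
        exact hr hc
      rw [if_neg hnc]
      simp [hr]
    · obtain ⟨hc, heq⟩ := pvSliceStep s hb hr
      rw [dif_neg hr, if_pos hc, heq]
  · rw [dif_neg hb, if_neg]
    intro hc
    obtain ⟨h1, h2⟩ := pvCond_mem s hc
    exact hb (by simp [PySem.Chars.isIn_iff_infix, pvSingInfix, h1, h2])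

theorem pvLoopA_eq_scan (s : List Char) : pvLoopA s = pvScanB s := by
  rw [pvLoopA_eq]
  by_cases h : pvCond s
  · rw [if_pos h, pvLoopA_eq_scan (pvStepList s), pvScanB_step s h]
  · rw [if_neg h, pvScanB_id s h]
termination_by s.length
decreasing_by exact pvStep_lt s h

-- B's fold computes pvScanB
theorem pvFoldB_spec (l : List Char) : ∀ out : List Char,
    ((l.foldl pvStepB (out, none)).1 ++ (l.foldl pvStepB (out, none)).2.getD [])
      = out ++ pvScanB l ∧
    ∀ buf, ((l.foldl pvStepB (out, some buf)).1 ++ (l.foldl pvStepB (out, some buf)).2.getD [])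
      = out ++ (if ']' ∈ l then pvScanB ((l.dropWhile (· ≠ ']')).tail) else buf ++ l) := by
  induction l with
  | nil => intro out; refine ⟨by simp [pvScanB_nil], fun buf => by simp⟩
  | cons c t ih =>
    intro out
    constructor
    · by_cases hc : c = '['
      · subst hc
        have hstep : pvStepB (out, none) '[' = (out, some ['[']) := by simp [pvStepB]
        rw [List.foldl_cons, hstep]
        rw [(ih out).2 ['[']]
        by_cases hm : ']' ∈ t
        · rw [if_pos hm, pvScanB_lb t hm]
        · rw [if_neg hm, pvScanB_lb_no t hm]
          simp
      · have hstep : pvStepB (out, none) c = (out ++ [c], none) := by simp [pvStepB, hc]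
        rw [List.foldl_cons, hstep, (ih (out ++ [c])).1, pvScanB_cons c t hc]
        simp
    · intro buf
      by_cases hc : c = ']'
      · subst hc
        have hstep : pvStepB (out, some buf) ']' = (out, none) := by simp [pvStepB]
        rw [List.foldl_cons, hstep, (ih out).1]
        rw [if_pos (List.mem_cons_self), List.dropWhile_cons_of_neg (by simp), List.tail_cons]
      · have hstep : pvStepB (out, some buf) c = (out, some (buf ++ [c])) := by
          simp [pvStepB, hc]
        rw [List.foldl_cons, hstep, (ih out).2 (buf ++ [c])]
        have hmem : (']' ∈ c :: t) ↔ (']' ∈ t) := by simp [List.mem_cons, Ne.symm hc]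
        by_cases hm : ']' ∈ t
        · rw [if_pos hm, if_pos (hmem.2 hm), List.dropWhile_cons_of_pos (by simp [hc])]
        · rw [if_neg hm, if_neg (fun h => hm (hmem.1 h))]
          simp
  
-- the two tails agree once the normalized strings agree
theorem pvTail_eq (s2 : List Char) :
    (if (PySem.Chars.splitOn s2 ['.']).filter (fun seg => !seg.isEmpty) = [] then false
     else if s2 = "container.pos".toList ∨ s2 = "container.size".toList then true
     else ((PySem.Chars.splitOn s2 ['.']).filter (fun seg => !seg.isEmpty)).any pvKeywordSeg)
    = (if s2 = "container.pos".toList ∨ s2 = "container.size".toList then true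
       else (PySem.Chars.splitOn s2 ['.']).any pvKeywordSeg) := by
  set segs := PySem.Chars.splitOn s2 ['.'] with hsegs
  have hfilter : (segs.filter (fun seg => !seg.isEmpty)).any pvKeywordSeg = segs.any pvKeywordSeg := by
    have h1 : (segs.filter (fun seg => !seg.isEmpty)).any pvKeywordSeg
        = segs.any (fun seg => !seg.isEmpty && pvKeywordSeg seg) := by
      induction segs with
      | nil => rfl
      | cons a t ih => by_cases h : (!a.isEmpty) = true <;> simp [h, ih]
    rw [h1]
    refine PySem.List.any_congr_mem (fun x _ => ?_)
    cases x with
    | nil => simp [pvKeywordSeg]; decide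
    | cons a t => simp
  by_cases heq : s2 = "container.pos".toList ∨ s2 = "container.size".toList
  · have hne : segs.filter (fun seg => !seg.isEmpty) ≠ [] := by
      rw [hsegs]; rcases heq with h | h <;> rw [h] <;> decide
    rw [if_neg hne, if_pos heq, if_pos heq]
  · rw [if_neg heq]
    by_cases hnil : segs.filter (fun seg => !seg.isEmpty) = []
    · rw [if_pos hnil, if_neg heq, ← hfilter, hnil]; simp
    · rw [if_neg hnil, if_neg heq, hfilter]

-- ===== VERDICT (by name: the statement is the Claim_ definition above) =====
set_option maxHeartbeats 1000000 in
theorem element_json_path_is_instant_safe_py_spec : Claim_equal_element_json_path_is_instant_safe_py := by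
  intro path _
  unfold Spec_element_json_path_is_instant_safe_py
  simp only [element_json_path_is_instant_safe_py, element_json_path_is_instant_safe_py_alt]
  have hscan := (pvFoldB_spec (PySem.Str.lower path).toList []).1
  simp only [List.nil_append] at hscan
  rw [pvLoopA_eq_scan, hscan]
  exact pvTail_eq _
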